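-- pv_equiv track=rewrite | github.com/huynggg/simplified-AES | aes.py | shifting
-- ===== SOURCE A (Python) =====
-- def shift_by_position(content, position):
-- 	temp = [0,0,0,0]
-- 	if (position == 0):
-- 		temp[0] = content[0]
-- 		temp[1] = content[1]
-- 		temp[2] = content[2]
-- 		temp[3] = content[3]
-- 	if (position == 1):
-- 		temp[0] = content[1]
-- 		temp[1] = content[2]
-- 		temp[2] = content[3]
-- 		temp[3] = content[0]
-- 	if (position == 2):
-- 		temp[0] = content[2]
-- 		temp[1] = content[3]
-- 		temp[2] = content[0]
-- 		temp[3] = content[1]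
-- 	if (position == 3):
-- 		temp[0] = content[3]
-- 		temp[1] = content[0]
-- 		temp[2] = content[1]
-- 		temp[3] = content[2]
-- 	return temp
--
-- def shifting(content):
-- 	position = 0
-- 	temp = []
-- 	for i in range(len(content)):
-- 		if position > 3:
-- 			position = 0
-- 		temp.append(shift_by_position(content[i],position))
-- 		position += 1
-- 	return temp
-- ===== SOURCE B (Python) =====
-- def shifting(content):
--     if not content:
--         return []
--     rotated = []
--     for pos, row in enumerate(content[:4]):
--         head = [row[j] for j in range(4)]
--         rotated.append((head + head)[pos:pos + 4])
--     return rotated + shifting(content[4:])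
-- ===== Notes on version B (the rewrite author's own statement) =====
-- stated objective: alternative
-- what changed: Replaces A's position counter with its >3 reset and the four-way if-table helper by recursive chunking of the rows into blocks of four, rotating each row of a block by its enumerate offset via the slice-of-doubled-head trick (head+head)[pos:pos+4] with head=[row[j] for j in range(4)].
import Mathlib
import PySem

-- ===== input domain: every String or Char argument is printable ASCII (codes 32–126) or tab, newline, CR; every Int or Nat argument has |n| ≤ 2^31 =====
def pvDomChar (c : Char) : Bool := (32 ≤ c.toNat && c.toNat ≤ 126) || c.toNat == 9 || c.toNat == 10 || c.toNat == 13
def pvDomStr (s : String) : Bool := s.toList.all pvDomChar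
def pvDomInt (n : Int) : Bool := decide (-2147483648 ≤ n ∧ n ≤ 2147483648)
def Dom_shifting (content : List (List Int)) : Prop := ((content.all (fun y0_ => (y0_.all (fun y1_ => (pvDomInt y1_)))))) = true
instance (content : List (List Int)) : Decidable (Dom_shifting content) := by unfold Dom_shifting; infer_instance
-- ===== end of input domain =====

-- B replaces A's position counter + four-way if-table by recursive chunking into blocks of
-- four rows, rotating each row by the slice-of-doubled-prefix trick (objective: alternative).

-- ===== PORT A =====
-- shift_by_position: temp = [0,0,0,0]; each if overwrites all four slots from content[0..3].
-- (pyGetD … 0 keeps the initial 0 exactly where Python would raise; such inputs are outside Pre_.)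
def shiftByPosition (content : List Int) (position : Int) : List Int :=
  let temp : List Int := [0, 0, 0, 0]
  let temp := if position = 0 then
      [PySem.List.pyGetD content 0 0, PySem.List.pyGetD content 1 0,
       PySem.List.pyGetD content 2 0, PySem.List.pyGetD content 3 0] else temp
  let temp := if position = 1 then
      [PySem.List.pyGetD content 1 0, PySem.List.pyGetD content 2 0,
       PySem.List.pyGetD content 3 0, PySem.List.pyGetD content 0 0] else temp
  let temp := if position = 2 then
      [PySem.List.pyGetD content 2 0, PySem.List.pyGetD content 3 0,
       PySem.List.pyGetD content 0 0, PySem.List.pyGetD content 1 0] else temp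
  let temp := if position = 3 then
      [PySem.List.pyGetD content 3 0, PySem.List.pyGetD content 0 0,
       PySem.List.pyGetD content 1 0, PySem.List.pyGetD content 2 0] else temp
  temp

-- the 'for i in range(len(content))' loop, carrying (position, temp) as in A
def shiftingLoop (rows : List (List Int)) (position : Int) (temp : List (List Int)) : List (List Int) :=
  match rows with
  | [] => temp
  | r :: rest =>
      let p := if position > 3 then 0 else position
      shiftingLoop rest (p + 1) (temp ++ [shiftByPosition r p])

def shifting (content : List (List Int)) : List (List Int) :=
  shiftingLoop content 0 []

-- ===== PORT B =====
-- (head + head)[pos:pos+4] where head = [row[j] for j in range(4)]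
-- (pyGetD … 0 keeps a default exactly where Python's row[j] would raise; such inputs are outside Pre_.)
def rotRow (pos : Int) (row : List Int) : List Int :=
  let head := (PySem.List.pyRange 0 4 1).map (fun j => PySem.List.pyGetD row j 0)
  PySem.List.slice (head ++ head) (some pos) (some (pos + 4))

-- if not content: return []; rotate the first block content[:4] by enumerate offsets; recurse on content[4:]
def shifting_alt (content : List (List Int)) : List (List Int) :=
  match content with
  | [] => []
  | hd :: tl =>
      let rotated := (PySem.List.enumerate (PySem.List.slice (hd :: tl) none (some 4)) 0).map
        (fun p => rotRow p.1 p.2)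
      rotated ++ shifting_alt (PySem.List.slice (hd :: tl) (some 4) none)
termination_by content.length
decreasing_by
  rw [PySem.List.slice_some_none]
  simp [PySem.List.clampIdx]

-- ===== PRECONDITION & SPEC =====
-- Pre_ excludes inputs containing a row of length < 4: there Python A raises IndexError (returns nothing).
def Pre_shifting (content : List (List Int)) : Prop :=
  ∀ row ∈ content, 4 ≤ row.length
instance (content : List (List Int)) : Decidable (Pre_shifting content) := by unfold Pre_shifting; infer_instance

def pvWitness_shifting : List (List Int) := [[1, 2, 3, 4], [5, 6, 7, 8], [9, 10, 11, 12]]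

def Spec_shifting (content : List (List Int)) (out : List (List Int)) : Prop := out = shifting_alt content
instance (content : List (List Int)) (out : List (List Int)) : Decidable (Spec_shifting content out) := by unfold Spec_shifting; infer_instance

-- ===== CLAIM (what is proved, stated in full; the proofs are below) =====
def Claim_equal_shifting : Prop := ∀ (content : List (List Int)), Dom_shifting content → Pre_shifting content → Spec_shifting content (shifting content)

-- ===== LEMMAS AND PROOFS =====

-- accumulator lemma for A's loop
lemma shiftingLoop_append (rows : List (List Int)) :
    ∀ (p : Int) (t : List (List Int)), shiftingLoop rows p t = t ++ shiftingLoop rows p [] := by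
  induction rows with
  | nil => intro p t; simp [shiftingLoop]
  | cons r rest ih =>
      intro p t
      simp only [shiftingLoop]
      conv_rhs => rw [ih]
      rw [ih]
      simp

-- position 4 restarts the cycle exactly like position 0
lemma shiftingLoop_four (rows : List (List Int)) (temp : List (List Int)) :
    shiftingLoop rows 4 temp = shiftingLoop rows 0 temp := by
  cases rows <;> simp [shiftingLoop]

-- A's table row equals B's doubled-prefix slice, for each of the four positions
lemma shiftByPosition_eq_rotRow (row : List Int) (p : Int)
    (h : 4 ≤ row.length) (hp : p = 0 ∨ p = 1 ∨ p = 2 ∨ p = 3) :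
    shiftByPosition row p = rotRow p row := by
  have hr : PySem.List.pyRange 0 4 1 = [0, 1, 2, 3] := by decide
  rcases row with _ | ⟨a, _ | ⟨b, _ | ⟨c, _ | ⟨d, t⟩⟩⟩⟩ <;> simp at h
  rcases hp with rfl | rfl | rfl | rfl <;>
    simp [shiftByPosition, rotRow, hr, PySem.List.pyGetD, PySem.List.pyGet?, PySem.List.pyIdx?,
      PySem.List.slice, PySem.List.clampIdx]

-- main unrolling: four loop steps match one recursive chunk of B
lemma shiftingLoop_eq_alt (content : List (List Int)) (h : Pre_shifting content) :
    shiftingLoop content 0 [] = shifting_alt content := by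
  generalize hl : content.length = n
  induction n using Nat.strong_induction_on generalizing content with
  | _ n ih =>
  rcases content with _ | ⟨r0, _ | ⟨r1, _ | ⟨r2, _ | ⟨r3, rest⟩⟩⟩⟩
  · simp [shiftingLoop, shifting_alt]
  · have h0 : 4 ≤ r0.length := h r0 (by simp)
    simp [shiftingLoop, shifting_alt, PySem.List.slice, PySem.List.clampIdx,
      PySem.List.enumerate_cons, PySem.List.enumerate_nil,
      shiftByPosition_eq_rotRow r0 0 h0 (by norm_num)]
  · have h0 : 4 ≤ r0.length := h r0 (by simp)
    have h1 : 4 ≤ r1.length := h r1 (by simp)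
    simp [shiftingLoop, shifting_alt, PySem.List.slice, PySem.List.clampIdx,
      PySem.List.enumerate_cons, PySem.List.enumerate_nil,
      shiftByPosition_eq_rotRow r0 0 h0 (by norm_num),
      shiftByPosition_eq_rotRow r1 1 h1 (by norm_num)]
  · have h0 : 4 ≤ r0.length := h r0 (by simp)
    have h1 : 4 ≤ r1.length := h r1 (by simp)
    have h2 : 4 ≤ r2.length := h r2 (by simp)
    simp [shiftingLoop, shifting_alt, PySem.List.slice, PySem.List.clampIdx,
      PySem.List.enumerate_cons, PySem.List.enumerate_nil,
      shiftByPosition_eq_rotRow r0 0 h0 (by norm_num),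
      shiftByPosition_eq_rotRow r1 1 h1 (by norm_num),
      shiftByPosition_eq_rotRow r2 2 h2 (by norm_num)]
  · have h0 : 4 ≤ r0.length := h r0 (by simp)
    have h1 : 4 ≤ r1.length := h r1 (by simp)
    have h2 : 4 ≤ r2.length := h r2 (by simp)
    have h3 : 4 ≤ r3.length := h r3 (by simp)
    have hrest : Pre_shifting rest := fun row hr => h row (by simp [hr])
    have hA : shiftingLoop (r0 :: r1 :: r2 :: r3 :: rest) 0 []
        = [shiftByPosition r0 0, shiftByPosition r1 1, shiftByPosition r2 2, shiftByPosition r3 3]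
          ++ shiftingLoop rest 0 [] := by
      simp only [shiftingLoop]
      norm_num
      rw [shiftingLoop_four, shiftingLoop_append]
      simp
    have hn : n = rest.length + 4 := by simpa using hl.symm
    rw [hA, ih rest.length (by omega) rest hrest rfl]
    simp [shifting_alt, PySem.List.slice, PySem.List.clampIdx,
      PySem.List.enumerate_cons, PySem.List.enumerate_nil,
      shiftByPosition_eq_rotRow r0 0 h0 (by norm_num),
      shiftByPosition_eq_rotRow r1 1 h1 (by norm_num),
      shiftByPosition_eq_rotRow r2 2 h2 (by norm_num),
      shiftByPosition_eq_rotRow r3 3 h3 (by norm_num)]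

-- ===== VERDICT (by name: the statement is the Claim_ definition above) =====
theorem shifting_spec : Claim_equal_shifting := by
  intro content _ hpre
  unfold Spec_shifting shifting
  exact shiftingLoop_eq_alt content hpre
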